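-- pv_equiv track=rewrite | github.com/AnthonyDiGirolamo/algorithms-in-python | arrays_and_strings_test.py | contains_only_unique_chars
-- ===== SOURCE A (Python) =====
-- import pprint
--
-- pp = pprint.PrettyPrinter(indent=4).pprint
--
-- def contains_only_unique_chars(chars, max_count=1):
--     """Check a string for unique charachters
--
--     Arguments:
--
--         chars:     the string to be checked
--         max_count: the number of allowed duplicates
--
--     Examples:
--
--         >>> contains_only_unique_chars("abcdefghijklmnopqrstuvwxyz")
--         True
--         >>> contains_only_unique_chars("a")
--         True
--         >>> contains_only_unique_chars("abcdefghhhhhh")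
--         False
--         >>> contains_only_unique_chars("  123456")
--         False
--     """
--     pp(chars)
--
--     # Hash
--
--     character_hash = {}
--     for c in chars:
--         character_hash[c] = character_hash.get(c, 0) + 1
--         if character_hash[c] > max_count:
--             return False
--     pp(character_hash)
--     return True
-- ===== SOURCE B (Python) =====
-- def contains_only_unique_chars(chars, max_count=1):
--     """Check a string for unique characters (at most max_count occurrences each).
--
--     Sort the characters so equal ones become adjacent, then recursively strip
--     one run of equal characters at a time, failing if a run is longer than
--     max_count.  No count table at all (A's pp printing side effects are not
--     reproduced).
--     """
--     def check(s):
--         if not s: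
--             return True
--         c = s[0]
--         k = 1
--         while k < len(s) and s[k] == c:
--             k += 1
--         if k > max_count:
--             return False
--         return check(s[k:])
--     return check(sorted(chars))
-- ===== Notes on version B (the rewrite author's own statement) =====
-- stated objective: alternative
-- what changed: A counts occurrences in a hash table with an early-exit check after each increment; B uses no count table at all: it sorts the characters so duplicates become adjacent and recursively strips one run of equal characters at a time, failing when a run exceeds max_count.
import Mathlib
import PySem

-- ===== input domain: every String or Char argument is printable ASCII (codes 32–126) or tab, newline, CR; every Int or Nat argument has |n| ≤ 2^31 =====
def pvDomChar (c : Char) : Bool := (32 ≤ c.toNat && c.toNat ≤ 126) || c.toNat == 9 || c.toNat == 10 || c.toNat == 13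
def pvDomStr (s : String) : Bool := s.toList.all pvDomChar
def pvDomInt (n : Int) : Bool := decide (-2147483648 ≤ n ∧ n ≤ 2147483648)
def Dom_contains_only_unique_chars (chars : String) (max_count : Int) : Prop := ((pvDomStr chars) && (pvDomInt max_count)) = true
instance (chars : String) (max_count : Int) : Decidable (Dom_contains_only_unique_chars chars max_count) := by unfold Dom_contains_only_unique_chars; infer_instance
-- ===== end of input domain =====

-- B uses no count table at all: it sorts the characters so duplicates become adjacent and
-- recursively strips one run of equal characters at a time, failing if a run is longer than
-- max_count (alternative algorithm, same purpose; A's pp printing side effects are not part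
-- of the return-value equivalence).

-- ===== PORT A =====
-- the loop 'for c in chars: character_hash[c] = …; if … > max_count: return False'
def containsUniqueLoopA (max_count : Int) : List Char → PySem.Dict Char Int → Bool
  | [], _ => true
  | c :: rest, d =>
    let d' := d.insert c (d.getD c 0 + 1)
    if d'.getD c 0 > max_count then false
    else containsUniqueLoopA max_count rest d'

def contains_only_unique_chars (chars : String) (max_count : Int) : Bool :=
  containsUniqueLoopA max_count chars.toList PySem.Dict.empty

-- ===== PORT B =====
-- Source B's inner 'check': the while loop counting the equal prefix is ported as
-- takeWhile's length (k = 1 + length of the equal prefix of the tail — exact),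
-- and 's[k:]' is then exactly the dropWhile of that same prefix.
def checkRunsB (max_count : Int) (s : List Char) : Bool :=
  match s with
  | [] => true
  | c :: rest =>
    let k : Int := 1 + (rest.takeWhile (fun x => x == c)).length
    if k > max_count then false
    else checkRunsB max_count (rest.dropWhile (fun x => x == c))
termination_by s.length
decreasing_by
  simp only [List.length_cons]
  exact Nat.lt_succ_of_le (List.length_dropWhile_le _ _)

def contains_only_unique_chars_alt (chars : String) (max_count : Int) : Bool :=
  checkRunsB max_count (PySem.List.sorted chars.toList (fun x => x) false)

-- ===== PRECONDITION & SPEC =====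
def Spec_contains_only_unique_chars (chars : String) (max_count : Int) (out : Bool) : Prop := out = contains_only_unique_chars_alt chars max_count
instance (chars : String) (max_count : Int) (out : Bool) : Decidable (Spec_contains_only_unique_chars chars max_count out) := by unfold Spec_contains_only_unique_chars; infer_instance

-- ===== CLAIM (what is proved, stated in full; the proofs are below) =====
def Claim_equal_contains_only_unique_chars : Prop := ∀ (chars : String) (max_count : Int), Dom_contains_only_unique_chars chars max_count → Spec_contains_only_unique_chars chars max_count (contains_only_unique_chars chars max_count)

-- ===== LEMMAS AND PROOFS =====

-- A's early-exit loop returns true iff every character's final total stays within max_count.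
theorem containsUniqueLoopA_eq (max_count : Int) (l : List Char) (d : PySem.Dict Char Int) :
    containsUniqueLoopA max_count l d
      = decide (∀ c ∈ l, d.getD c 0 + (l.count c : Int) ≤ max_count) := by
  induction l generalizing d with
  | nil => simp [containsUniqueLoopA]
  | cons c rest ih =>
    simp only [containsUniqueLoopA]
    rw [PySem.Dict.getD_insert_self]
    by_cases h : d.getD c 0 + 1 > max_count
    · rw [if_pos h]
      have hnot : ¬ (∀ x ∈ c :: rest, d.getD x 0 + ((c :: rest).count x : Int) ≤ max_count) := by
        intro hall
        have hcc := hall c (List.mem_cons_self)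
        have hc : (1 : Int) ≤ ((c :: rest).count c : Int) := by
          have : 1 ≤ (c :: rest).count c := by simp
          exact_mod_cast this
        omega
      exact ((decide_eq_false hnot).symm)
    · rw [if_neg h, ih]
      apply decide_eq_decide.mpr
      constructor
      · intro hall x hx
        rcases List.mem_cons.mp hx with hxc | hxr
        · subst hxc
          by_cases hcr : x ∈ rest
          · have hv := hall x hcr
            rw [PySem.Dict.getD_insert_self] at hv
            simp only [List.count_cons_self] at *
            push_cast at hv ⊢
            omega
          · have hz : rest.count x = 0 := List.count_eq_zero.mpr hcr
            simp only [List.count_cons_self, hz]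
            push_cast
            omega
        · have hv := hall x hxr
          by_cases hxec : x = c
          · subst hxec
            rw [PySem.Dict.getD_insert_self] at hv
            simp only [List.count_cons_self]
            push_cast at hv ⊢
            omega
          · rw [PySem.Dict.getD_insert_of_ne d _ _ hxec] at hv
            rw [List.count_cons_of_ne (fun h => hxec h.symm)]
            exact hv
      · intro hall x hxr
        by_cases hxec : x = c
        · subst hxec
          have hv := hall x (List.mem_cons_self)
          rw [PySem.Dict.getD_insert_self]
          simp only [List.count_cons_self] at hv
          push_cast at hv ⊢
          omega
        · have hv := hall x (List.mem_cons_of_mem _ hxr)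
          rw [PySem.Dict.getD_insert_of_ne d _ _ hxec]
          rw [List.count_cons_of_ne (fun h => hxec h.symm)] at hv
          exact hv

-- In a sorted tail whose elements all dominate c, c does not survive dropWhile (== c).
theorem not_mem_dropWhile_of_sorted (c : Char) (l : List Char)
    (hp : l.Pairwise (· ≤ ·)) (hge : ∀ x ∈ l, c ≤ x) :
    c ∉ l.dropWhile (fun x => x == c) := by
  induction l with
  | nil => simp
  | cons a t ih =>
    by_cases hac : a = c
    · subst hac
      rw [List.dropWhile_cons_of_pos (by simp)]
      exact ih (List.Pairwise.of_cons hp) (fun x hx => hge x (List.mem_cons_of_mem _ hx))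
    · rw [List.dropWhile_cons_of_neg (by simp [hac])]
      intro hmem
      rcases List.mem_cons.mp hmem with hca | hct
      · exact hac hca.symm
      · have h1 : a ≤ c := (List.pairwise_cons.mp hp).1 c hct
        have h2 : c ≤ a := hge a (List.mem_cons_self)
        exact hac (le_antisymm h1 h2)

-- On a sorted list, B's run-stripping recursion decides the per-character count bound.
theorem checkRunsB_eq (m : Int) (n : Nat) :
    ∀ (l : List Char), l.length ≤ n → l.Pairwise (· ≤ ·) →
      checkRunsB m l = decide (∀ c ∈ l, (l.count c : Int) ≤ m) := by
  induction n with
  | zero =>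
    intro l hlen _
    have : l = [] := List.eq_nil_of_length_eq_zero (Nat.le_zero.mp hlen)
    subst this
    simp [checkRunsB]
  | succ n ih =>
    intro l hlen hp
    match l with
    | [] => simp [checkRunsB]
    | c :: rest =>
      have hge : ∀ x ∈ rest, c ≤ x := (List.pairwise_cons.mp hp).1
      have hprest : rest.Pairwise (· ≤ ·) := (List.pairwise_cons.mp hp).2
      set tw := rest.takeWhile (fun x => x == c) with htw
      set dw := rest.dropWhile (fun x => x == c) with hdw
      have hsplit : tw ++ dw = rest := List.takeWhile_append_dropWhile
      have htwall : ∀ x ∈ tw, x = c := by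
        intro x hx
        have := List.mem_takeWhile_imp hx
        simpa using this
      have hcdw : c ∉ dw := not_mem_dropWhile_of_sorted c rest hprest hge
      -- count of c in the whole list is 1 + tw.length
      have hcount_c : (c :: rest).count c = 1 + tw.length := by
        rw [List.count_cons_self, ← hsplit, List.count_append]
        have h1 : tw.count c = tw.length := by
          rw [List.count_eq_length]
          intro b hb
          exact (htwall b hb).symm
        have h2 : dw.count c = 0 := List.count_eq_zero.mpr hcdw
        omega
      -- count of x ≠ c in the whole list equals its count in dw
      have hcount_ne : ∀ x, x ≠ c → (c :: rest).count x = dw.count x := by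
        intro x hx
        rw [List.count_cons_of_ne (by exact fun h => hx h.symm), ← hsplit, List.count_append]
        have h1 : tw.count x = 0 := by
          apply List.count_eq_zero.mpr
          intro hmem
          exact hx (htwall x hmem)
        omega
      have hdwlen : dw.length ≤ n := by
        have h1 : dw.length ≤ rest.length := hdw ▸ List.length_dropWhile_le _ _
        simp only [List.length_cons] at hlen
        omega
      have hdwp : dw.Pairwise (· ≤ ·) :=
        List.Pairwise.sublist (hdw ▸ List.dropWhile_sublist _) hprest
      have hih := ih dw hdwlen hdwp
      simp only [checkRunsB, ← htw, ← hdw]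
      by_cases hbig : (1 + (tw.length : Int)) > m
      · rw [if_pos hbig]
        have hnot : ¬ (∀ x ∈ c :: rest, ((c :: rest).count x : Int) ≤ m) := by
          intro hall
          have := hall c (List.mem_cons_self)
          rw [hcount_c] at this
          push_cast at this
          omega
        exact (decide_eq_false hnot).symm
      · rw [if_neg hbig, hih]
        apply decide_eq_decide.mpr
        constructor
        · intro hall x hx
          by_cases hxc : x = c
          · subst hxc
            rw [hcount_c]
            push_cast
            omega
          · rw [hcount_ne x hxc]
            apply hall
            rcases List.mem_cons.mp hx with h | h
            · exact absurd h hxc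
            · rw [← hsplit] at h
              rcases List.mem_append.mp h with h' | h'
              · exact absurd (htwall x h') hxc
              · exact h'
        · intro hall x hx
          have hxne : x ≠ c := fun h => hcdw (h ▸ hx)
          have hxmem : x ∈ c :: rest := by
            apply List.mem_cons_of_mem
            rw [← hsplit]
            exact List.mem_append_right _ hx
          have := hall x hxmem
          rw [hcount_ne x hxne] at this
          exact this

-- ===== VERDICT (by name: the statement is the Claim_ definition above) =====
theorem contains_only_unique_chars_spec : Claim_equal_contains_only_unique_chars := by
  intro chars max_count _
  unfold Spec_contains_only_unique_chars contains_only_unique_chars contains_only_unique_chars_alt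
  set l := chars.toList
  set s := PySem.List.sorted l (fun x => x) false with hs
  have hperm : s.Perm l := PySem.List.sorted_perm l (fun x => x) false
  have hpair : s.Pairwise (· ≤ ·) := by
    have := PySem.List.sorted_pairwise l (fun x => x)
    simpa using this
  rw [containsUniqueLoopA_eq, checkRunsB_eq max_count s.length s (le_refl _) hpair]
  apply decide_eq_decide.mpr
  constructor
  · intro hall c hc
    have := hall c (hperm.mem_iff.mp hc)
    rw [hperm.count_eq] at *
    simpa using this
  · intro hall c hc
    have := hall c (hperm.mem_iff.mpr hc)
    rw [hperm.count_eq] at this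
    simpa using this
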